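-- pv_equiv track=rewrite | github.com/GraceHanJiarui/Companion-AI | paper_run_experiment.py | parse_projector_profile
-- ===== SOURCE A (Python) =====
-- def parse_projector_profile(experiment_mode: str) -> str:
--     for suffix in [
--         "fitlinear",
--         "fitpoly2",
--         "fitmlp_h4",
--         "fitmlp_h8",
--         "fitmlp_h12",
--         "v3a",
--         "v3b",
--         "legacy",
--         "balanced",
--         "conservative",
--         "sparse",
--     ]:
--         tag = f"_p{suffix}"
--         if experiment_mode.endswith(tag):
--             return suffix
--     return "legacy"
-- ===== SOURCE B (Python) =====
-- VALID = frozenset({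
--     "fitlinear", "fitpoly2", "fitmlp_h4", "fitmlp_h8", "fitmlp_h12",
--     "v3a", "v3b", "legacy", "balanced", "conservative", "sparse",
-- })
--
--
-- def parse_projector_profile(experiment_mode: str) -> str:
--     _head, sep, tail = experiment_mode.rpartition("_p")
--     if sep and tail in VALID:
--         return tail
--     return "legacy"
-- ===== Notes on version B (the rewrite author's own statement) =====
-- stated objective: simpler
-- what changed: Replaced A's 11-iteration endswith scan over tag strings with a single rpartition('_p') parse followed by one frozenset membership test (no suffix contains an internal '_p', so the token after the last '_p' is exactly the matched tag).
import Mathlib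
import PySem

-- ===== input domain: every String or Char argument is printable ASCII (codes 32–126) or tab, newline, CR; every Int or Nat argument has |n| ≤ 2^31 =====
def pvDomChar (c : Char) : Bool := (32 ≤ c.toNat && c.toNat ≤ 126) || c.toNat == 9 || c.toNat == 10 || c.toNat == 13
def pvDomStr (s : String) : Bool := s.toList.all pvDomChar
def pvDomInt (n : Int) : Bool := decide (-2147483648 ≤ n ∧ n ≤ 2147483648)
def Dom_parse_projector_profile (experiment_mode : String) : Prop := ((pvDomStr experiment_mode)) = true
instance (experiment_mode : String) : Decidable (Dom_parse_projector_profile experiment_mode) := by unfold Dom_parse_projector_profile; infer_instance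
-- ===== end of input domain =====

-- B replaces A's 11-iteration endswith scan by a single rpartition("_p") parse plus one set membership; objective: simpler.

-- ===== PORT A =====
def pvSuffixes : List String :=
  ["fitlinear", "fitpoly2", "fitmlp_h4", "fitmlp_h8", "fitmlp_h12",
   "v3a", "v3b", "legacy", "balanced", "conservative", "sparse"]

-- A's for-loop with early return, as recursion over the suffix list
def pvGoA (m : String) : List String → String
  | [] => "legacy"
  | s :: rest => if PySem.Str.endswith m ("_p" ++ s) then s else pvGoA m rest

def parse_projector_profile (experiment_mode : String) : String :=
  pvGoA experiment_mode pvSuffixes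

-- ===== PORT B =====
def pvValid : List String :=
  ["fitlinear", "fitpoly2", "fitmlp_h4", "fitmlp_h8", "fitmlp_h12",
   "v3a", "v3b", "legacy", "balanced", "conservative", "sparse"]

-- hand port of str.rpartition("_p"): the characters after the LAST occurrence of "_p",
-- none when "_p" does not occur (exact for this fixed two-character separator)
def pvRpartAfterP : List Char → Option (List Char)
  | [] => none
  | [_] => none
  | a :: b :: rest =>
      if a = '_' ∧ b = 'p' then some ((pvRpartAfterP rest).getD rest)
      else pvRpartAfterP (b :: rest)
termination_by l => l.length
decreasing_by all_goals simp

def parse_projector_profile_alt (experiment_mode : String) : String :=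
  match pvRpartAfterP experiment_mode.toList with
  | some t => if pvValid.contains (String.ofList t) then String.ofList t else "legacy"
  | none => "legacy"

-- ===== PRECONDITION & SPEC =====
def Spec_parse_projector_profile (experiment_mode : String) (out : String) : Prop := out = parse_projector_profile_alt experiment_mode
instance (experiment_mode : String) (out : String) : Decidable (Spec_parse_projector_profile experiment_mode out) := by unfold Spec_parse_projector_profile; infer_instance

-- ===== CLAIM (what is proved, stated in full; the proofs are below) =====
def Claim_equal_parse_projector_profile : Prop := ∀ (experiment_mode : String), Dom_parse_projector_profile experiment_mode → Spec_parse_projector_profile experiment_mode (parse_projector_profile experiment_mode)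

-- ===== LEMMAS AND PROOFS =====

lemma rp_some_decomp : ∀ (L t : List Char), pvRpartAfterP L = some t →
    ∃ u, L = u ++ '_' :: 'p' :: t := by
  intro L
  induction L using pvRpartAfterP.induct with
  | case1 => intro t h; simp [pvRpartAfterP] at h
  | case2 c => intro t h; simp [pvRpartAfterP] at h
  | case3 a b rest hab ih =>
      intro t h
      obtain ⟨rfl, rfl⟩ := hab
      simp only [pvRpartAfterP] at h
      cases hr : pvRpartAfterP rest with
      | none => rw [hr] at h; simp at h; exact ⟨[], by rw [h]; simp⟩
      | some r =>
          rw [hr] at h; simp at h; subst h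
          obtain ⟨u, hu⟩ := ih r hr
          exact ⟨'_' :: 'p' :: u, by rw [hu]; simp⟩
  | case4 a b rest hab ih =>
      intro t h
      simp only [pvRpartAfterP, if_neg hab] at h
      obtain ⟨u, hu⟩ := ih t h
      exact ⟨a :: u, by rw [hu]; simp⟩

lemma rp_inner_none (t : List Char) (ht : ¬ (['_', 'p'] <:+: t)) :
    pvRpartAfterP t = none := by
  cases hr : pvRpartAfterP t with
  | none => rfl
  | some r =>
      obtain ⟨u, hu⟩ := rp_some_decomp t r hr
      exact absurd (⟨u, r, by rw [hu]; simp⟩ : ['_', 'p'] <:+: t) ht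

lemma rp_of_decomp_nil (t : List Char) (ht : ¬ (['_', 'p'] <:+: t)) :
    pvRpartAfterP ('_' :: 'p' :: t) = some t := by
  simp [pvRpartAfterP, rp_inner_none t ht]

lemma rp_of_decomp : ∀ (u t : List Char), ¬ (['_', 'p'] <:+: t) →
    pvRpartAfterP (u ++ '_' :: 'p' :: t) = some t := by
  intro u
  induction u using pvRpartAfterP.induct with
  | case1 => intro t ht; simpa using rp_of_decomp_nil t ht
  | case2 c =>
      intro t ht
      by_cases hc : c = '_' ∧ '_' = 'p'
      · exact absurd hc.2 (by decide)
      · simp [pvRpartAfterP, rp_inner_none t ht]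
  | case3 a b rest hab ih =>
      intro t ht
      obtain ⟨rfl, rfl⟩ := hab
      simp only [List.cons_append, pvRpartAfterP]
      rw [ih t ht]
      rfl
  | case4 a b rest hab ih =>
      intro t ht
      simp only [List.cons_append, pvRpartAfterP, if_neg hab] at ih ⊢
      exact ih t ht

lemma endswith_iff_rp (L s : List Char) (hs : ¬ (['_', 'p'] <:+: s)) :
    ('_' :: 'p' :: s <:+ L) ↔ pvRpartAfterP L = some s := by
  constructor
  · rintro ⟨u, rfl⟩; exact rp_of_decomp u s hs
  · intro h
    obtain ⟨u, rfl⟩ := rp_some_decomp L s h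
    exact ⟨u, rfl⟩

-- ===== VERDICT (by name: the statement is the Claim_ definition above) =====
lemma endswith_key (m : String) (t : List Char) (hs : ¬ (['_', 'p'] <:+: t)) :
    PySem.Chars.endswith m.toList ('_' :: 'p' :: t) = decide (pvRpartAfterP m.toList = some t) := by
  have h1 : PySem.Chars.endswith m.toList ('_' :: 'p' :: t) = true ↔
      pvRpartAfterP m.toList = some t := by
    rw [PySem.Chars.endswith_iff]
    exact endswith_iff_rp m.toList t hs
  rcases Decidable.em (pvRpartAfterP m.toList = some t) with hp | hp
  · rw [decide_eq_true hp]
    exact h1.mpr hp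
  · simp only [decide_eq_false hp]
    exact (Bool.not_eq_true _).mp fun ht => hp (h1.mp ht)

theorem parse_projector_profile_spec : Claim_equal_parse_projector_profile := by
  intro m _
  unfold Spec_parse_projector_profile parse_projector_profile parse_projector_profile_alt
  have k1 := endswith_key m ['f', 'i', 't', 'l', 'i', 'n', 'e', 'a', 'r'] (by decide)
  have k2 := endswith_key m ['f', 'i', 't', 'p', 'o', 'l', 'y', '2'] (by decide)
  have k3 := endswith_key m ['f', 'i', 't', 'm', 'l', 'p', '_', 'h', '4'] (by decide)
  have k4 := endswith_key m ['f', 'i', 't', 'm', 'l', 'p', '_', 'h', '8'] (by decide)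
  have k5 := endswith_key m ['f', 'i', 't', 'm', 'l', 'p', '_', 'h', '1', '2'] (by decide)
  have k6 := endswith_key m ['v', '3', 'a'] (by decide)
  have k7 := endswith_key m ['v', '3', 'b'] (by decide)
  have k8 := endswith_key m ['l', 'e', 'g', 'a', 'c', 'y'] (by decide)
  have k9 := endswith_key m ['b', 'a', 'l', 'a', 'n', 'c', 'e', 'd'] (by decide)
  have k10 := endswith_key m ['c', 'o', 'n', 's', 'e', 'r', 'v', 'a', 't', 'i', 'v', 'e'] (by decide)
  have k11 := endswith_key m ['s', 'p', 'a', 'r', 's', 'e'] (by decide)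
  cases hrp : pvRpartAfterP m.toList with
  | none =>
      simp [pvGoA, pvSuffixes, k1, k2, k3, k4, k5, k6, k7, k8, k9, k10, k11, hrp]
  | some t =>
      by_cases hm : t ∈ pvValid.map String.toList
      · simp only [pvValid, List.map] at hm
        simp only [List.mem_cons, List.not_mem_nil, or_false] at hm
        rcases hm with rfl | rfl | rfl | rfl | rfl | rfl | rfl | rfl | rfl | rfl | rfl <;>
          simp [pvGoA, pvSuffixes, pvValid, k1, k2, k3, k4, k5, k6, k7, k8, k9, k10, k11, hrp]
      ·
        have n1 : t ≠ ['f', 'i', 't', 'l', 'i', 'n', 'e', 'a', 'r'] := fun h => hm (by rw [h]; simp [pvValid])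
        have n2 : t ≠ ['f', 'i', 't', 'p', 'o', 'l', 'y', '2'] := fun h => hm (by rw [h]; simp [pvValid])
        have n3 : t ≠ ['f', 'i', 't', 'm', 'l', 'p', '_', 'h', '4'] := fun h => hm (by rw [h]; simp [pvValid])
        have n4 : t ≠ ['f', 'i', 't', 'm', 'l', 'p', '_', 'h', '8'] := fun h => hm (by rw [h]; simp [pvValid])
        have n5 : t ≠ ['f', 'i', 't', 'm', 'l', 'p', '_', 'h', '1', '2'] := fun h => hm (by rw [h]; simp [pvValid])
        have n6 : t ≠ ['v', '3', 'a'] := fun h => hm (by rw [h]; simp [pvValid])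
        have n7 : t ≠ ['v', '3', 'b'] := fun h => hm (by rw [h]; simp [pvValid])
        have n8 : t ≠ ['l', 'e', 'g', 'a', 'c', 'y'] := fun h => hm (by rw [h]; simp [pvValid])
        have n9 : t ≠ ['b', 'a', 'l', 'a', 'n', 'c', 'e', 'd'] := fun h => hm (by rw [h]; simp [pvValid])
        have n10 : t ≠ ['c', 'o', 'n', 's', 'e', 'r', 'v', 'a', 't', 'i', 'v', 'e'] := fun h => hm (by rw [h]; simp [pvValid])
        have n11 : t ≠ ['s', 'p', 'a', 'r', 's', 'e'] := fun h => hm (by rw [h]; simp [pvValid])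
        simp [pvGoA, pvSuffixes, pvValid, k1, k2, k3, k4, k5, k6, k7, k8, k9, k10, k11, hrp,
          n1, n2, n3, n4, n5, n6, n7, n8, n9, n10, n11]
        intro h
        exfalso
        rcases h with h | h | h | h | h | h | h | h | h | h | h <;>
          (replace h := congrArg String.toList h; simp at h) <;> simp_all
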